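-- pv_equiv track=rewrite | github.com/dhkim77000/winery | code/text/data_utils.py | check_note_in_review
-- ===== SOURCE A (Python) =====
-- def check_note_in_review(text, notes_data):
--     text = text.lower()
--     result = []
--     for key in notes_data:
--         if any(word in text for word in notes_data[key]):
--             result.append(1)
--         else: result.append(0)
--     return result
-- ===== SOURCE B (Python) =====
-- def check_note_in_review(text, notes_data):
--     # Text-driven multi-pattern matching: one pass over text positions, slicing
--     # candidate substrings of the lengths that occur among the words and looking
--     # them up in a hash set, instead of scanning the text once per word.
--     t = text.lower()
--     n = len(t)
--     words = set()
--     for ws in notes_data.values():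
--         words.update(ws)
--     lens = sorted({len(w) for w in words})
--     found = set()
--     for i in range(n + 1):
--         for L in lens:
--             if i + L <= n and t[i:i+L] in words:
--                 found.add(t[i:i+L])
--     return [1 if any(w in found for w in ws) else 0 for ws in notes_data.values()]
-- ===== Notes on version B (the rewrite author's own statement) =====
-- stated objective: faster
-- what changed: B is text-driven multi-pattern matching: it builds a hash set of all words and the sorted set of their lengths, scans the text once per position slicing candidates of those lengths and collecting matched words in a 'found' set, then emits flags by hash-set membership; A is pattern-driven, re-scanning the whole text for every word occurrence of every key.
import Mathlib
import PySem

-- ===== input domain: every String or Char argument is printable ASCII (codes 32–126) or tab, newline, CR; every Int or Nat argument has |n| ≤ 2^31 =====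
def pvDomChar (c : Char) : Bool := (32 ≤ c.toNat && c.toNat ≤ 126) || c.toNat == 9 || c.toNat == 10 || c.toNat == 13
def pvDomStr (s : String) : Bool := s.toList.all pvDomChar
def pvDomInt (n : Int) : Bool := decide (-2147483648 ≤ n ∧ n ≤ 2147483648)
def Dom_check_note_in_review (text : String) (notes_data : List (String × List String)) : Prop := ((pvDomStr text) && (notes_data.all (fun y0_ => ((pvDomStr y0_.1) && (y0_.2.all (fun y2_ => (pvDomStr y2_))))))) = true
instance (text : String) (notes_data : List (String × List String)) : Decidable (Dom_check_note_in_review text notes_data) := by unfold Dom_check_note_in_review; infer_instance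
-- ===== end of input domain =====

-- B replaces A's per-word scans of the text by a text-driven pass: it slices each text
-- position at every occurring word length and looks the slice up in a word set ('alternative').

-- ===== PORT A =====
-- 'for key in notes_data: result.append(1 if any(word in text for word in notes_data[key]) else 0)'
def check_note_in_review (text : String) (notes_data : List (String × List String)) : List Int :=
  let t := PySem.Str.lower text
  let d := PySem.Dict.ofList notes_data
  d.keys.foldl (fun result key =>
    if (d.getD key []).any (fun word => PySem.Str.isIn word t) then result ++ [1]
    else result ++ [0]) []

-- ===== PORT B =====
def check_note_in_review_alt (text : String) (notes_data : List (String × List String)) : List Int :=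
  let t := PySem.Str.lower text
  let n := PySem.Str.len t
  let d := PySem.Dict.ofList notes_data
  -- words = set(); for ws in notes_data.values(): words.update(ws)
  let words : PySem.Set String := d.values.foldl (fun s ws => PySem.Set.update s ws) PySem.Set.empty
  -- lens = sorted({len(w) for w in words})
  let lens : List Int :=
    PySem.List.sorted (PySem.Set.ofList (words.map (fun w => PySem.Str.len w))) (fun x => x) false
  -- found = set(); for i in range(n+1): for L in lens: if i+L<=n and t[i:i+L] in words: found.add(t[i:i+L])
  let found : PySem.Set String :=
    (PySem.List.pyRange 0 (n + 1) 1).foldl (fun f i =>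
      lens.foldl (fun f L =>
        if i + L ≤ n ∧ PySem.Set.contains words (PySem.Str.slice t (some i) (some (i + L))) = true
        then PySem.Set.add f (PySem.Str.slice t (some i) (some (i + L)))
        else f) f) PySem.Set.empty
  -- [1 if any(w in found for w in ws) else 0 for ws in notes_data.values()]
  d.values.map (fun ws => if ws.any (fun w => PySem.Set.contains found w) then (1 : Int) else 0)

-- ===== PRECONDITION & SPEC =====
def Spec_check_note_in_review (text : String) (notes_data : List (String × List String)) (out : List Int) : Prop := out = check_note_in_review_alt text notes_data
instance (text : String) (notes_data : List (String × List String)) (out : List Int) : Decidable (Spec_check_note_in_review text notes_data out) := by unfold Spec_check_note_in_review; infer_instance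

-- ===== CLAIM (what is proved, stated in full; the proofs are below) =====
def Claim_equal_check_note_in_review : Prop := ∀ (text : String) (notes_data : List (String × List String)), Dom_check_note_in_review text notes_data → Spec_check_note_in_review text notes_data (check_note_in_review text notes_data)

-- ===== LEMMAS AND PROOFS =====

-- membership through a foldl whose step only adds elements described by Q
theorem pvMemFoldl {α β : Type} (step : List β → α → List β) (Q : α → β → Prop)
    (hstep : ∀ s x y, y ∈ step s x ↔ y ∈ s ∨ Q x y) :
    ∀ (l : List α) (s0 : List β) (y : β), y ∈ l.foldl step s0 ↔ y ∈ s0 ∨ ∃ x ∈ l, Q x y := by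
  intro l
  induction l with
  | nil => simp
  | cons a l ih =>
    intro s0 y
    simp only [List.foldl_cons, ih, hstep, List.mem_cons]
    constructor
    · rintro ((h | h) | ⟨x, hx, hq⟩)
      · exact Or.inl h
      · exact Or.inr ⟨a, Or.inl rfl, h⟩
      · exact Or.inr ⟨x, Or.inr hx, hq⟩
    · rintro (h | ⟨x, (rfl | hx), hq⟩)
      · exact Or.inl (Or.inl h)
      · exact Or.inl (Or.inr hq)
      · exact Or.inr ⟨x, hx, hq⟩

-- membership in the words accumulator
theorem pvMemWords (vs : List (List String)) (w : String) :
    (w ∈ vs.foldl (fun s ws => PySem.Set.update s ws) PySem.Set.empty) ↔ ∃ ws ∈ vs, w ∈ ws := by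
  rw [pvMemFoldl (fun s ws => PySem.Set.update s ws) (fun ws y => y ∈ ws)
      (fun s ws y => by simp [PySem.Set.mem_update s ws y])]
  simp [PySem.Set.empty]

-- membership in the found accumulator: some position/length pair produced w
theorem pvMemFound (t : String) (n : Int) (lens : List Int) (words : PySem.Set String) (w : String) :
    (w ∈ (PySem.List.pyRange 0 (n + 1) 1).foldl (fun f i =>
        lens.foldl (fun f L =>
          if i + L ≤ n ∧ PySem.Set.contains words (PySem.Str.slice t (some i) (some (i + L))) = true
          then PySem.Set.add f (PySem.Str.slice t (some i) (some (i + L)))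
          else f) f) PySem.Set.empty) ↔
      ∃ i ∈ PySem.List.pyRange 0 (n + 1) 1, ∃ L ∈ lens,
        (i + L ≤ n ∧ PySem.Set.contains words (PySem.Str.slice t (some i) (some (i + L))) = true)
          ∧ w = PySem.Str.slice t (some i) (some (i + L)) := by
  rw [pvMemFoldl _
      (fun i y => ∃ L ∈ lens,
        (i + L ≤ n ∧ PySem.Set.contains words (PySem.Str.slice t (some i) (some (i + L))) = true)
          ∧ y = PySem.Str.slice t (some i) (some (i + L)))
      (fun f i y => by
        rw [pvMemFoldl _
            (fun L z =>
              (i + L ≤ n ∧ PySem.Set.contains words (PySem.Str.slice t (some i) (some (i + L))) = true)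
                ∧ z = PySem.Str.slice t (some i) (some (i + L)))
            (fun f L z => by
              split
              · rename_i hc
                rw [PySem.Set.mem_add]
                constructor
                · rintro (h | h)
                  · exact Or.inl h
                  · exact Or.inr ⟨hc, h⟩
                · rintro (h | ⟨_, h⟩)
                  · exact Or.inl h
                  · exact Or.inr h
              · rename_i hc
                constructor
                · exact Or.inl
                · rintro (h | ⟨hcc, _⟩)
                  · exact h
                  · exact absurd hcc hc)])]
  simp [PySem.Set.empty]

-- for a word of the collected set, membership in 'found' is exactly 'word in text'
theorem pvFoundIffIsIn (t : String) (words : PySem.Set String) (lens : List Int)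
    (hlens : ∀ w ∈ words, PySem.Str.len w ∈ lens) (hlens0 : ∀ L ∈ lens, 0 ≤ L)
    (w : String) (hw : w ∈ words) :
    (w ∈ (PySem.List.pyRange 0 (PySem.Str.len t + 1) 1).foldl (fun f i =>
        lens.foldl (fun f L =>
          if i + L ≤ PySem.Str.len t ∧
              PySem.Set.contains words (PySem.Str.slice t (some i) (some (i + L))) = true
          then PySem.Set.add f (PySem.Str.slice t (some i) (some (i + L)))
          else f) f) PySem.Set.empty) ↔ PySem.Str.isIn w t = true := by
  rw [pvMemFound]
  have hlen : PySem.Str.len t = (t.toList.length : Int) := by simp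
  constructor
  · rintro ⟨i, hi, L, hL, ⟨hle, -⟩, rfl⟩
    rw [PySem.List.mem_pyRange_one] at hi
    have h0L : (0 : Int) ≤ L := hlens0 L hL
    -- the slice is a prefix of a suffix of t, hence a substring
    rw [PySem.Str.isIn_iff_infix]
    have hsl : (PySem.Str.slice t (some i) (some (i + L))).toList
        = (t.toList.drop i.toNat).take ((i + L).toNat - i.toNat) := by
      rw [PySem.Str.toList_slice, PySem.Chars.slice_eq_listSlice,
          PySem.List.slice_toNat t.toList hi.1 (by omega)]
    refine List.IsInfix.trans ?_ (List.drop_suffix i.toNat t.toList).isInfix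
    rw [hsl]
    exact (List.take_prefix _ _).isInfix
  · intro hin
    have hinf := (PySem.Str.isIn_iff_infix w t).mp hin
    obtain ⟨j, hpre⟩ : ∃ j, w.toList <+: t.toList.drop j := by
      obtain ⟨s₁, s₂, hs⟩ := hinf
      exact ⟨s₁.length, by rw [← hs]; simp [List.prefix_append]⟩
    set N := t.toList.length with hN
    have hpre' : w.toList <+: t.toList.drop (min j N) := by
      rcases le_total j N with h | h
      · simpa [min_eq_left h] using hpre
      · have hdnil : t.toList.drop j = [] := List.drop_eq_nil_of_le (by omega)
        have hwnil : w.toList = [] := List.prefix_nil.mp (hdnil ▸ hpre)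
        simp [hwnil]
    set j' := min j N with hj'
    have hj'le : j' ≤ N := min_le_right _ _
    have hwlen : w.toList.length ≤ N - j' := by
      have := hpre'.length_le
      simpa [hN] using this
    refine ⟨(j' : Int), ?_, (w.toList.length : Int), ?_, ⟨?_, ?_⟩, ?_⟩
    · rw [PySem.List.mem_pyRange_one]
      constructor
      · positivity
      · rw [hlen]; omega
    · have := hlens w hw
      simpa using this
    · rw [hlen]; omega
    · have hslice : (PySem.Str.slice t (some (j' : Int))
          (some ((j' : Int) + (w.toList.length : Int)))).toList = w.toList := by
        rw [PySem.Str.toList_slice, PySem.Chars.slice_eq_listSlice, PySem.List.slice_natCast_add]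
        exact (List.prefix_iff_eq_take.mp hpre').symm
      rw [String.toList_inj.mp hslice]
      exact (PySem.Set.contains_iff _ _).mpr hw
    · have hslice : (PySem.Str.slice t (some (j' : Int))
          (some ((j' : Int) + (w.toList.length : Int)))).toList = w.toList := by
        rw [PySem.Str.toList_slice, PySem.Chars.slice_eq_listSlice, PySem.List.slice_natCast_add]
        exact (List.prefix_iff_eq_take.mp hpre').symm
      exact (String.toList_inj.mp hslice).symm

-- A's append-foldl is a map over the keys
theorem pvFoldlAppendIte (f : String → Bool) (ks : List String) (acc : List Int) :
    ks.foldl (fun result key => if f key then result ++ [1] else result ++ [0]) acc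
      = acc ++ ks.map (fun key => if f key then (1 : Int) else 0) := by
  induction ks generalizing acc with
  | nil => simp
  | cons k ks ih => simp only [List.foldl, List.map]; rw [ih]; split <;> simp

-- any over the same list with pointwise-equal predicates
theorem pvAnyCongr {α : Type} (l : List α) (p q : α → Bool) (h : ∀ x ∈ l, p x = q x) :
    l.any p = l.any q := by
  induction l with
  | nil => rfl
  | cons a l ih => simp [List.any_cons, h a (by simp), ih (fun x hx => h x (by simp [hx]))]

-- ===== VERDICT (by name: the statement is the Claim_ definition above) =====
set_option maxHeartbeats 1000000 in
theorem check_note_in_review_spec : Claim_equal_check_note_in_review := by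
  intro text notes_data _
  unfold Spec_check_note_in_review check_note_in_review check_note_in_review_alt
  simp only []
  set t := PySem.Str.lower text
  set d := PySem.Dict.ofList notes_data with hd
  set words : PySem.Set String :=
    d.values.foldl (fun s ws => PySem.Set.update s ws) PySem.Set.empty with hwords
  set lens : List Int :=
    PySem.List.sorted (PySem.Set.ofList (words.map (fun w => PySem.Str.len w))) (fun x => x) false
      with hlensdef
  have hlens : ∀ w ∈ words, PySem.Str.len w ∈ lens := by
    intro w hw
    rw [hlensdef, PySem.List.mem_sorted, PySem.Set.mem_ofList]
    exact List.mem_map.mpr ⟨w, hw, rfl⟩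
  have hlens0 : ∀ L ∈ lens, 0 ≤ L := by
    intro L hL
    rw [hlensdef, PySem.List.mem_sorted, PySem.Set.mem_ofList] at hL
    obtain ⟨w, -, rfl⟩ := List.mem_map.mp hL
    simp
  set found : PySem.Set String :=
    (PySem.List.pyRange 0 (PySem.Str.len t + 1) 1).foldl (fun f i =>
      lens.foldl (fun f L =>
        if i + L ≤ PySem.Str.len t ∧
            PySem.Set.contains words (PySem.Str.slice t (some i) (some (i + L))) = true
        then PySem.Set.add f (PySem.Str.slice t (some i) (some (i + L)))
        else f) f) PySem.Set.empty with hfound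
  rw [pvFoldlAppendIte]
  rw [PySem.Dict.values_eq_map_keys d (PySem.Dict.nodup_keys_ofList notes_data) ([] : List String),
      List.map_map]
  simp only [List.nil_append]
  apply List.map_congr_left
  intro k hk
  have hval : d.getD k [] ∈ d.values := by
    rw [PySem.Dict.values_eq_map_keys d (PySem.Dict.nodup_keys_ofList notes_data) ([] : List String)]
    exact List.mem_map.mpr ⟨k, hk, rfl⟩
  simp only [Function.comp]
  have key : ∀ w ∈ d.getD k [], PySem.Str.isIn w t = PySem.Set.contains found w := by
    intro w hw
    have hwmem : w ∈ words := by
      rw [hwords, pvMemWords]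
      exact ⟨d.getD k [], hval, hw⟩
    have h1 : (w ∈ found) ↔ PySem.Str.isIn w t = true := by
      rw [hfound]
      exact pvFoundIffIsIn t words lens hlens hlens0 w hwmem
    rw [Bool.eq_iff_iff]
    exact h1.symm.trans (PySem.Set.contains_iff found w).symm
  have hany := pvAnyCongr (d.getD k []) (fun word => PySem.Str.isIn word t)
    (fun w => PySem.Set.contains found w) key
  rw [hany]
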